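-- pv_equiv track=rewrite | github.com/marcoce005/Python | reply_code_challenge2k22/Replay_Challenge/metaverse/metaverse.py | cal_num_of_concurrent_days
-- ===== SOURCE A (Python) =====
-- def cal_num_of_concurrent_days(calendar, n, m):
--     total_day = 0
--     for c in range(0,m):
--         single_day = 0
--         for r in range(0,n):
--             single_day += calendar[r][c]
--         if single_day == n:
--             total_day += 1
--     return total_day
-- ===== SOURCE B (Python) =====
-- def cal_num_of_concurrent_days(calendar, n, m):
--     # Row-major single pass with an accumulator array of per-column sums,
--     # then count the entries equal to n. With no columns there is nothing
--     # to accumulate, so the row pass is skipped.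
--     sums = [0] * m
--     if sums:
--         for r in range(0, n):
--             sums = [s + calendar[r][c] for c, s in enumerate(sums)]
--     total_day = 0
--     for s in sums:
--         if s == n:
--             total_day += 1
--     return total_day
-- ===== Notes on version B (the rewrite author's own statement) =====
-- stated objective: alternative
-- what changed: Replaces A's column-by-column recomputation (outer loop over columns, inner loop over rows) with one row-major pass that maintains an accumulator list of all m column sums, followed by a final count of entries equal to n.
import Mathlib
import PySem

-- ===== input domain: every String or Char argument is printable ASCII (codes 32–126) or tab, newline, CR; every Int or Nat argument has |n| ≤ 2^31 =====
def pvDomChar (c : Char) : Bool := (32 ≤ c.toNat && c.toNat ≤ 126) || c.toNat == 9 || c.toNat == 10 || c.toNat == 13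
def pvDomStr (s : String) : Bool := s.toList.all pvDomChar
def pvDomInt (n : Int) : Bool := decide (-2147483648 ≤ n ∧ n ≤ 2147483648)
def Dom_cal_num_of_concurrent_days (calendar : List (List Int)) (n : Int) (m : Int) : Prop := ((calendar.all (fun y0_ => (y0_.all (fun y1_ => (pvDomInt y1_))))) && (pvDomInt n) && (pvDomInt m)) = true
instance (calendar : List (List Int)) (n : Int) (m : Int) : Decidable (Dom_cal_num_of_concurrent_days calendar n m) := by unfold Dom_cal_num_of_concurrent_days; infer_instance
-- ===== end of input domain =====

-- B replaces A's per-column inner summation loop with a single row-major pass over an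
-- accumulator list of all column sums, then counts entries equal to n (objective: alternative).

-- ===== PORT A =====
-- literal port of A: outer loop over c in range(0,m), inner loop over r in range(0,n);
-- calendar[r][c] is PySem.List.pyGetD (in range on every input admitted by Pre_)
def cal_num_of_concurrent_days (calendar : List (List Int)) (n : Int) (m : Int) : Int :=
  (PySem.List.pyRange 0 m 1).foldl
    (fun total_day c =>
      let single_day :=
        (PySem.List.pyRange 0 n 1).foldl
          (fun single_day r => single_day + PySem.List.pyGetD (PySem.List.pyGetD calendar r []) c 0) 0
      if single_day = n then total_day + 1 else total_day) 0

-- ===== PORT B =====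
-- literal port of Source B: sums = [0]*m ([] for m ≤ 0, hence toNat); one pass over r in range(0,n)
-- rebuilding sums via the enumerate comprehension (skipped when sums is empty);
-- final counting loop over sums
def cal_num_of_concurrent_days_alt (calendar : List (List Int)) (n : Int) (m : Int) : Int :=
  let sums0 : List Int := List.replicate m.toNat 0
  let sums :=
    if sums0.isEmpty then sums0 else
    (PySem.List.pyRange 0 n 1).foldl
      (fun sums r =>
        (PySem.List.enumerate sums 0).map
          (fun p => p.2 + PySem.List.pyGetD (PySem.List.pyGetD calendar r []) p.1 0)) sums0
  sums.foldl (fun total_day s => if s = n then total_day + 1 else total_day) 0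

-- ===== PRECONDITION & SPEC =====
-- Pre_ excludes exactly the inputs on which Python A raises IndexError:
-- whenever both loops run (n > 0 and m > 0), the first n rows must exist and each have length ≥ m.
def Pre_cal_num_of_concurrent_days (calendar : List (List Int)) (n : Int) (m : Int) : Prop :=
  n ≤ 0 ∨ m ≤ 0 ∨ (n ≤ (calendar.length : Int) ∧ ∀ row ∈ calendar.take n.toNat, m ≤ (row.length : Int))
instance (calendar : List (List Int)) (n : Int) (m : Int) : Decidable (Pre_cal_num_of_concurrent_days calendar n m) := by unfold Pre_cal_num_of_concurrent_days; infer_instance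

def pvWitness_cal_num_of_concurrent_days : List (List Int) × Int × Int := ([[1, 0], [1, 1]], 2, 2)

def Spec_cal_num_of_concurrent_days (calendar : List (List Int)) (n : Int) (m : Int) (out : Int) : Prop := out = cal_num_of_concurrent_days_alt calendar n m
instance (calendar : List (List Int)) (n : Int) (m : Int) (out : Int) : Decidable (Spec_cal_num_of_concurrent_days calendar n m out) := by unfold Spec_cal_num_of_concurrent_days; infer_instance

-- ===== CLAIM (what is proved, stated in full; the proofs are below) =====
def Claim_equal_cal_num_of_concurrent_days : Prop := ∀ (calendar : List (List Int)) (n : Int) (m : Int), Dom_cal_num_of_concurrent_days calendar n m → Pre_cal_num_of_concurrent_days calendar n m → Spec_cal_num_of_concurrent_days calendar n m (cal_num_of_concurrent_days calendar n m)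

-- ===== LEMMAS AND PROOFS =====

-- one row-step of B maps a sums list of shape (pyRange 0 m 1).map g to the same shape with the row added in
theorem pv_step (m : Int) (g : Int → Int) (row : List Int) :
    (PySem.List.enumerate ((PySem.List.pyRange 0 m 1).map g) 0).map
        (fun p => p.2 + PySem.List.pyGetD row p.1 0)
      = (PySem.List.pyRange 0 m 1).map (fun c => g c + PySem.List.pyGetD row c 0) := by
  apply List.ext_getElem
  · simp [PySem.List.length_enumerate]
  · intro k h1 h2
    simp [PySem.List.getElem_enumerate, PySem.List.getElem_pyRange_one]

-- B's whole row loop, for any start shape (pyRange 0 m 1).map g, yields the interchanged column sums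
theorem pv_rows (calendar : List (List Int)) (m : Int) :
    ∀ (rs : List Int) (g : Int → Int),
      rs.foldl
        (fun sums r =>
          (PySem.List.enumerate sums 0).map
            (fun p => p.2 + PySem.List.pyGetD (PySem.List.pyGetD calendar r []) p.1 0))
        ((PySem.List.pyRange 0 m 1).map g)
      = (PySem.List.pyRange 0 m 1).map
          (fun c => rs.foldl
            (fun a r => a + PySem.List.pyGetD (PySem.List.pyGetD calendar r []) c 0) (g c)) := by
  intro rs
  induction rs with
  | nil => intro g; simp
  | cons r rs ih =>
      intro g
      simp only [List.foldl_cons, pv_step]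
      exact ih _

-- ===== VERDICT (by name: the statement is the Claim_ definition above) =====
theorem cal_num_of_concurrent_days_spec : Claim_equal_cal_num_of_concurrent_days := by
  intro calendar n m _ _
  unfold Spec_cal_num_of_concurrent_days cal_num_of_concurrent_days cal_num_of_concurrent_days_alt
  by_cases hm : m.toNat = 0
  · have hr : PySem.List.pyRange 0 m 1 = [] := PySem.List.pyRange_one_eq_nil (by omega)
    simp [hr, hm]
  · have h0 : (List.replicate m.toNat (0 : Int)) = (PySem.List.pyRange 0 m 1).map (fun _ => (0 : Int)) := by
      simp [List.map_const', PySem.List.length_pyRange_one]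
    have hne : (List.replicate m.toNat (0 : Int)).isEmpty = false := by
      simp [hm]
    simp only [hne, Bool.false_eq_true, if_false]
    simp only [h0, pv_rows, List.foldl_map]
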